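-- pv_equiv track=rewrite | github.com/massprogressive/Sudoku | functions.py | calculate_common
-- ===== SOURCE A (Python) =====
-- def calculate_common(data):
--     lst = []
--     for new in data:
--         lst += data[new]
--     moves = sorted(set(lst))
--     result = []
--     for move in moves:
--         count = 0
--         for number in data:
--             if move in data[number]:
--                 count += 1
--             if count > 1:
--                 result.append(move)
--                 break
--     return result
-- ===== SOURCE B (Python) =====
-- def calculate_common(data):
--     seen = set()
--     dup = set()
--     for lst in data.values():
--         for x in set(lst):
--             if x in seen:
--                 dup.add(x)
--             else:
--                 seen.add(x)
--     return sorted(dup)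
-- ===== Notes on version B (the rewrite author's own statement) =====
-- stated objective: alternative
-- what changed: Replaces the candidate loop (sort all values, then rescan every dict list per candidate) by a single pass over the lists that maintains 'seen' and 'seen-twice' sets, sorting only the duplicates at the end.
import Mathlib
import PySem

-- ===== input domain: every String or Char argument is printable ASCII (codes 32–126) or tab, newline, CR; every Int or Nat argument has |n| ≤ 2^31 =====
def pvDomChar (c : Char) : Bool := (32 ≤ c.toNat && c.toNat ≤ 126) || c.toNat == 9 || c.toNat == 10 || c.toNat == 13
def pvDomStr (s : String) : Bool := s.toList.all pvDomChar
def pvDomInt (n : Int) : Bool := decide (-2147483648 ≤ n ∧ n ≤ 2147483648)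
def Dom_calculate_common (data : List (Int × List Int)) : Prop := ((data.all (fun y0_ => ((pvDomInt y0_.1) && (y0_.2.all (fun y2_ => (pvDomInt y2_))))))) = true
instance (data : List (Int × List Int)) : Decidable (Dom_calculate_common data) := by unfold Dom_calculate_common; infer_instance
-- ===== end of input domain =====

-- B replaces A's candidate loop (sort all values, then rescan every dict list per candidate) by one
-- pass over the lists maintaining 'seen' / 'seen twice' sets, sorting only the duplicates.

-- ===== PORT A =====
-- inner 'for number in data' loop: returns whether 'move' was appended (count reached 2, then break)
def ccGo (d : PySem.Dict Int (List Int)) (move : Int) : List Int → Int → Bool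
  | [], _ => false
  | k :: rest, count =>
    -- 'data[number]': the key is always a key of the dict, so getD with any default is exact
    let count' := if move ∈ d.getD k [] then count + 1 else count
    if count' > 1 then true else ccGo d move rest count'

def calculate_common (data : List (Int × List Int)) : List Int :=
  let d := PySem.Dict.ofList data
  let lst := d.keys.foldl (fun acc k => acc ++ d.getD k []) []
  let moves := PySem.List.sorted (PySem.Set.ofList lst) (fun x => x)
  moves.foldl (fun result move => if ccGo d move d.keys 0 then result ++ [move] else result) []

-- ===== PORT B =====
-- one element step: if x in seen: dup.add(x) else: seen.add(x)
def altStep (sd : PySem.Set Int × PySem.Set Int) (x : Int) : PySem.Set Int × PySem.Set Int :=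
  if PySem.Set.contains sd.1 x then (sd.1, PySem.Set.add sd.2 x) else (PySem.Set.add sd.1 x, sd.2)

def calculate_common_alt (data : List (Int × List Int)) : List Int :=
  let d := PySem.Dict.ofList data
  let sd := d.values.foldl (fun sd v => (PySem.Set.ofList v).foldl altStep sd)
              (PySem.Set.empty, PySem.Set.empty)
  PySem.List.sorted sd.2 (fun x => x)

-- ===== PRECONDITION & SPEC =====
def Spec_calculate_common (data : List (Int × List Int)) (out : List Int) : Prop := out = calculate_common_alt data
instance (data : List (Int × List Int)) (out : List Int) : Decidable (Spec_calculate_common data out) := by unfold Spec_calculate_common; infer_instance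

-- ===== CLAIM (what is proved, stated in full; the proofs are below) =====
def Claim_equal_calculate_common : Prop := ∀ (data : List (Int × List Int)), Dom_calculate_common data → Spec_calculate_common data (calculate_common data)

-- ===== LEMMAS AND PROOFS =====

-- how many of the dict's lists contain x
def ccCnt (d : PySem.Dict Int (List Int)) (x : Int) : Nat :=
  d.items.countP (fun kv => decide (x ∈ kv.2))

lemma ccGo_char (d : PySem.Dict Int (List Int)) (move : Int) (ks : List Int) :
    ∀ c : Int, c ≤ 1 → ccGo d move ks c =
      decide (2 ≤ c + (ks.countP (fun k => decide (move ∈ d.getD k [])) : Int)) := by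
  induction ks with
  | nil =>
    intro c hc
    have h0 : ¬ (2 ≤ c + ((List.countP (fun k => decide (move ∈ d.getD k [])) [] : Nat) : Int)) := by
      simp only [List.countP_nil]; omega
    simp only [ccGo]
    exact (decide_eq_false h0).symm
  | cons k rest ih =>
    intro c hc
    by_cases h1 : move ∈ d.getD k []
    · simp only [ccGo, List.countP_cons, h1, if_pos, decide_true]
      by_cases h2 : c + 1 > 1
      · rw [if_pos h2]
        have : (2 : Int) ≤ c + ((rest.countP (fun k => decide (move ∈ d.getD k [])) + 1 : Nat) : Int) := by
          push_cast; omega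
        exact (decide_eq_true this).symm
      · rw [if_neg h2, ih (c + 1) (by omega)]
        simp only [decide_eq_decide]
        push_cast; omega
    · have h2 : ¬ c > 1 := by omega
      simp only [ccGo, List.countP_cons, h1, decide_false, Bool.false_eq_true, if_false,
        if_neg h2, Nat.add_zero]
      rw [ih c hc]

lemma countP_keys_eq (d : PySem.Dict Int (List Int)) (hnd : d.keys.Nodup) (x : Int) :
    d.keys.countP (fun k => decide (x ∈ d.getD k [])) = ccCnt d x := by
  have hkeys : d.keys = d.items.map Prod.fst := rfl
  rw [hkeys, List.countP_map, ccCnt]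
  refine List.countP_congr (fun kv hkv => ?_)
  have h1 : d.get? kv.1 = some kv.2 := PySem.Dict.get?_of_mem_items d (by simpa using hkv) hnd
  simp [Function.comp, PySem.Dict.getD_of_get?_eq_some d [] h1]

lemma A_mem (data : List (Int × List Int)) (x : Int) :
    x ∈ calculate_common data ↔ 2 ≤ ccCnt (PySem.Dict.ofList data) x := by
  set d := PySem.Dict.ofList data with hd
  have hnd : d.keys.Nodup := PySem.Dict.nodup_keys_ofList data
  have hgo : ∀ y, ccGo d y d.keys 0 = decide (2 ≤ (0 : Int) + (ccCnt d y : Int)) := by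
    intro y
    rw [ccGo_char d y d.keys 0 (by norm_num), countP_keys_eq d hnd y]
  unfold calculate_common
  rw [← hd]
  rw [PySem.List.foldl_append_if_eq_filter, List.nil_append, List.mem_filter,
    PySem.List.mem_sorted, PySem.Set.mem_ofList, PySem.List.foldl_append_eq_flatMap,
    List.nil_append, List.mem_flatMap, hgo x, decide_eq_true_eq]
  constructor
  · rintro ⟨-, h⟩; omega
  · intro h
    refine ⟨?_, by omega⟩
    have hp : 0 < d.keys.countP (fun k => decide (x ∈ d.getD k [])) := by
      rw [countP_keys_eq d hnd x]; omega
    obtain ⟨k, hk, hpk⟩ := List.countP_pos_iff.mp hp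
    exact ⟨k, hk, of_decide_eq_true hpk⟩

lemma A_pairwise (data : List (Int × List Int)) :
    (calculate_common data).Pairwise (· < ·) := by
  unfold calculate_common
  simp only [PySem.List.foldl_append_if_eq_filter, List.nil_append]
  exact (PySem.List.sorted_ofList_pairwise_lt _).sublist List.filter_sublist

lemma inner_char (es : List Int) (hnd : es.Nodup) :
    ∀ (seen dup : PySem.Set Int) (x : Int),
      (x ∈ (es.foldl altStep (seen, dup)).1 ↔ x ∈ seen ∨ x ∈ es) ∧
      (x ∈ (es.foldl altStep (seen, dup)).2 ↔ x ∈ dup ∨ (x ∈ es ∧ x ∈ seen)) := by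
  induction es with
  | nil => intro seen dup x; simp
  | cons e rest ih =>
    intro seen dup x
    obtain ⟨he, hrest⟩ := List.nodup_cons.mp hnd
    by_cases hes : e ∈ seen
    · have hc : PySem.Set.contains seen e = true := by
        simp [PySem.Set.contains]; exact hes
      simp only [List.foldl_cons, altStep, hc, if_pos]
      obtain ⟨h1, h2⟩ := ih hrest seen (PySem.Set.add dup e) x
      refine ⟨h1.trans ?_, h2.trans ?_⟩
      · constructor
        · rintro (h | h) <;> simp [h]
        · rintro (h | h)
          · exact Or.inl h
          · rcases List.mem_cons.mp h with rfl | h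
            · exact Or.inl hes
            · exact Or.inr h
      · rw [PySem.Set.mem_add]
        constructor
        · rintro ((h | rfl) | ⟨h1', h2'⟩)
          · exact Or.inl h
          · exact Or.inr ⟨List.mem_cons_self, hes⟩
          · exact Or.inr ⟨List.mem_cons_of_mem _ h1', h2'⟩
        · rintro (h | ⟨h1', h2'⟩)
          · exact Or.inl (Or.inl h)
          · rcases List.mem_cons.mp h1' with rfl | h1''
            · exact Or.inl (Or.inr rfl)
            · exact Or.inr ⟨h1'', h2'⟩
    · have hc : PySem.Set.contains seen e = false := by
        simp [PySem.Set.contains]; exact hes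
      simp only [List.foldl_cons, altStep, hc, Bool.false_eq_true, if_neg, not_false_iff]
      obtain ⟨h1, h2⟩ := ih hrest (PySem.Set.add seen e) dup x
      refine ⟨h1.trans ?_, h2.trans ?_⟩
      · rw [PySem.Set.mem_add]
        constructor
        · rintro ((h | rfl) | h)
          · exact Or.inl h
          · exact Or.inr List.mem_cons_self
          · exact Or.inr (List.mem_cons_of_mem _ h)
        · rintro (h | h)
          · exact Or.inl (Or.inl h)
          · rcases List.mem_cons.mp h with rfl | h'
            · exact Or.inl (Or.inr rfl)
            · exact Or.inr h'
      · constructor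
        · rintro (h | ⟨h1', h2'⟩)
          · exact Or.inl h
          · rcases (PySem.Set.mem_add seen e x).mp h2' with h2'' | rfl
            · exact Or.inr ⟨List.mem_cons_of_mem _ h1', h2''⟩
            · exact absurd h1' he
        · rintro (h | ⟨h1', h2'⟩)
          · exact Or.inl h
          · rcases List.mem_cons.mp h1' with rfl | h1''
            · exact absurd h2' hes
            · exact Or.inr ⟨h1'', (PySem.Set.mem_add seen e x).mpr (Or.inl h2')⟩

lemma outer_char (vs : List (List Int)) :
    ∀ (seen dup : PySem.Set Int) (x : Int),
      (x ∈ (vs.foldl (fun sd v => (PySem.Set.ofList v).foldl altStep sd) (seen, dup)).1 ↔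
        x ∈ seen ∨ 1 ≤ vs.countP (fun v => decide (x ∈ v))) ∧
      (x ∈ (vs.foldl (fun sd v => (PySem.Set.ofList v).foldl altStep sd) (seen, dup)).2 ↔
        x ∈ dup ∨ (x ∈ seen ∧ 1 ≤ vs.countP (fun v => decide (x ∈ v))) ∨
          2 ≤ vs.countP (fun v => decide (x ∈ v))) := by
  induction vs with
  | nil => intro seen dup x; simp
  | cons v rest ih =>
    intro seen dup x
    have hin := inner_char (PySem.Set.ofList v) (PySem.Set.nodup_ofList v) seen dup
    set r := (PySem.Set.ofList v).foldl altStep (seen, dup) with hr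
    have hpair : (r.1, r.2) = r := rfl
    obtain ⟨ha, hb⟩ := ih r.1 r.2 x
    rw [hpair] at ha hb
    obtain ⟨hi1, hi2⟩ := hin x
    simp only [List.foldl_cons, ← hr, List.countP_cons]
    rw [ha, hb, hi1, hi2]
    by_cases hv : x ∈ v <;> by_cases hs : x ∈ seen <;> by_cases hdx : x ∈ dup <;>
      simp only [PySem.Set.mem_ofList, hv, hs, hdx, decide_true, decide_false,
        Bool.false_eq_true, if_true, if_false, Nat.add_zero, true_and, false_and, and_true,
        and_false, true_or, false_or, or_true, or_false, true_iff] <;> omega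

lemma inner_nodup (es : List Int) :
    ∀ (seen dup : PySem.Set Int), dup.Nodup → (es.foldl altStep (seen, dup)).2.Nodup := by
  induction es with
  | nil => intro _ _ h; exact h
  | cons e rest ih =>
    intro seen dup h
    simp only [List.foldl_cons, altStep]
    split_ifs
    · exact ih _ _ (PySem.Set.nodup_add dup e h)
    · exact ih _ _ h

lemma outer_nodup (vs : List (List Int)) :
    ∀ (seen dup : PySem.Set Int), dup.Nodup →
      (vs.foldl (fun sd v => (PySem.Set.ofList v).foldl altStep sd) (seen, dup)).2.Nodup := by
  induction vs with
  | nil => intro _ _ h; exact h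
  | cons v rest ih =>
    intro seen dup h
    simp only [List.foldl_cons]
    set r := (PySem.Set.ofList v).foldl altStep (seen, dup) with hr
    have h2 : r.2.Nodup := inner_nodup (PySem.Set.ofList v) seen dup h
    have := ih r.1 r.2 h2
    simpa using this

lemma values_countP (d : PySem.Dict Int (List Int)) (x : Int) :
    d.values.countP (fun v => decide (x ∈ v)) = ccCnt d x := by
  have hv : d.values = d.items.map Prod.snd := rfl
  rw [hv, List.countP_map, ccCnt]
  rfl

lemma main_eq (data : List (Int × List Int)) :
    calculate_common data = calculate_common_alt data := by
  set d := PySem.Dict.ofList data with hd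
  set sd := d.values.foldl (fun sd v => (PySem.Set.ofList v).foldl altStep sd)
      (PySem.Set.empty, PySem.Set.empty) with hsd
  have hB : calculate_common_alt data = PySem.List.sorted sd.2 (fun x => x) := rfl
  have hmemB : ∀ x, x ∈ sd.2 ↔ 2 ≤ ccCnt d x := by
    intro x
    have h := (outer_char d.values PySem.Set.empty PySem.Set.empty x).2
    rw [← hsd, values_countP d x] at h
    rw [h]
    simp [PySem.Set.empty]
  have hmemA : ∀ x, x ∈ calculate_common data ↔ 2 ≤ ccCnt d x := fun x => A_mem data x
  have hpwA : (calculate_common data).Pairwise (· < ·) := A_pairwise data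
  have hndA : (calculate_common data).Nodup := hpwA.imp (fun h => ne_of_lt h)
  have hndB : sd.2.Nodup := outer_nodup d.values PySem.Set.empty PySem.Set.empty List.nodup_nil
  have hperm : (calculate_common data).Perm sd.2 :=
    (List.perm_ext_iff_of_nodup hndA hndB).mpr (fun a => (hmemA a).trans (hmemB a).symm)
  rw [hB]
  exact (PySem.List.sorted_eq_of_perm_of_pairwise_lt sd.2 (calculate_common data) (fun x => x) hperm hpwA).symm

-- ===== VERDICT (by name: the statement is the Claim_ definition above) =====
theorem calculate_common_spec : Claim_equal_calculate_common := by
  intro data _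
  unfold Spec_calculate_common
  exact main_eq data
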